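-- pv_equiv track=rewrite | github.com/mokshithpyla/DS-Algo | Company_Prep/Google/salutes.py | solution
-- ===== SOURCE A (Python) =====
-- def solution(s):
-- # Your code here
--     cross = 0
--     salute = 0
--     for i in range(len(s)):
--         if s[i] is '<':
--             cross += 1
--     for x in range(len(s)):
--         if s[x] is '>':
--             salute += cross
--         elif s[x] is '<':
--             cross -= 1
--     salutes = salute * 2
--     return salutes
-- ===== SOURCE B (Python) =====
-- def solution(s):
--     right = 0
--     total = 0
--     for ch in s:
--         if ch == '>':
--             right += 1
--         elif ch == '<':
--             total += right
--     return total * 2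
-- ===== Notes on version B (the rewrite author's own statement) =====
-- stated objective: simpler
-- what changed: One forward pass accumulating, at each left-facing character, the number of right-facing characters already seen, instead of A's two index loops (pre-count all left-facing, then at each right-facing add the count of those remaining).
import Mathlib
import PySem

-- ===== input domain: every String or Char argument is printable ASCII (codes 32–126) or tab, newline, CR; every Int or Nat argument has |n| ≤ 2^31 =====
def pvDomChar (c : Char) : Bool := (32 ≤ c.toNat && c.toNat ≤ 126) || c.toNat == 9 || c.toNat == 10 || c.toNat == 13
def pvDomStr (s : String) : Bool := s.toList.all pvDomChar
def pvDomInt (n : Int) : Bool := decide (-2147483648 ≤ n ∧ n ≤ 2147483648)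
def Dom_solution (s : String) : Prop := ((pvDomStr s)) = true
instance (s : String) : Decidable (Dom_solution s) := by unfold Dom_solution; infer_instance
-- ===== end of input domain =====

-- B replaces A's two index loops by one forward pass counting '>' seen before each '<' (simpler).

-- ===== PORT A =====
-- two index loops: first counts '<'; second adds the remaining-'<' count at each '>'
def solution (s : String) : Int :=
  let cs := s.toList
  let cross : Int :=
    (PySem.List.pyRange 0 (PySem.Str.len s) 1).foldl
      (fun c i => if PySem.List.pyGetD cs i ' ' = '<' then c + 1 else c) 0
  let st :=
    (PySem.List.pyRange 0 (PySem.Str.len s) 1).foldl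
      (fun (p : Int × Int) x =>
        if PySem.List.pyGetD cs x ' ' = '>' then (p.1, p.2 + p.1)
        else if PySem.List.pyGetD cs x ' ' = '<' then (p.1 - 1, p.2)
        else p)
      (cross, 0)
  st.2 * 2

-- ===== PORT B =====
-- one pass: count '>' seen so far; at each '<' add that count to the total
def solution_alt (s : String) : Int :=
  let st := s.toList.foldl
    (fun (p : Int × Int) ch =>
      if ch = '>' then (p.1 + 1, p.2)
      else if ch = '<' then (p.1, p.2 + p.1)
      else p)
    (0, 0)
  st.2 * 2

-- ===== PRECONDITION & SPEC =====
def Spec_solution (s : String) (out : Int) : Prop := out = solution_alt s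
instance (s : String) (out : Int) : Decidable (Spec_solution s out) := by unfold Spec_solution; infer_instance

-- ===== CLAIM (what is proved, stated in full; the proofs are below) =====
def Claim_equal_solution : Prop := ∀ (s : String), Dom_solution s → Spec_solution s (solution s)

-- ===== LEMMAS AND PROOFS =====

-- #'<' in xs, as an Int
def cntL (xs : List Char) : Int := (xs.countP (· = '<') : Int)
-- #'>' in xs
def cntG (xs : List Char) : Int := (xs.countP (· = '>') : Int)
-- number of ('>', later '<') pairs
def pairs : List Char → Int
  | [] => 0
  | x :: xs => (if x = '>' then cntL xs else 0) + pairs xs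

theorem cntL_cons (x : Char) (xs : List Char) :
    cntL (x :: xs) = (if x = '<' then 1 else 0) + cntL xs := by
  simp [cntL, List.countP_cons]; split_ifs <;> ring

theorem cntG_cons (x : Char) (xs : List Char) :
    cntG (x :: xs) = (if x = '>' then 1 else 0) + cntG xs := by
  simp [cntG, List.countP_cons]; split_ifs <;> ring

theorem countA (xs : List Char) (a : Int) :
    xs.foldl (fun c ch => if ch = '<' then c + 1 else c) a = a + cntL xs := by
  induction xs generalizing a with
  | nil => simp [cntL]
  | cons x xs ih =>
    simp only [List.foldl_cons, ih, cntL_cons]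
    split_ifs <;> ring

theorem foldA (xs : List Char) (c s : Int) :
    (xs.foldl
      (fun (p : Int × Int) x =>
        if x = '>' then (p.1, p.2 + p.1)
        else if x = '<' then (p.1 - 1, p.2)
        else p)
      (cntL xs + c, s)).2 = s + c * cntG xs + pairs xs := by
  induction xs generalizing c s with
  | nil => simp [cntL, cntG, pairs]
  | cons x xs ih =>
    by_cases hg : x = '>'
    · simp only [List.foldl_cons, hg, cntL_cons, cntG_cons, pairs, reduceIte, Char.reduceEq]
      rw [show ((0:Int) + cntL xs + c) = cntL xs + c from by ring, ih]
      ring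
    · by_cases hl : x = '<'
      · simp only [List.foldl_cons, hl, cntL_cons, cntG_cons, pairs, reduceIte, Char.reduceEq]
        rw [show ((1:Int) + cntL xs + c - 1) = cntL xs + c from by ring, ih]
        ring
      · simp only [List.foldl_cons, if_neg hg, if_neg hl, cntL_cons, cntG_cons, pairs]
        rw [show ((0:Int) + cntL xs + c) = cntL xs + c from by ring, ih]
        ring

theorem foldB (xs : List Char) (g t : Int) :
    (xs.foldl
      (fun (p : Int × Int) ch =>
        if ch = '>' then (p.1 + 1, p.2)
        else if ch = '<' then (p.1, p.2 + p.1)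
        else p)
      (g, t)).2 = t + g * cntL xs + pairs xs := by
  induction xs generalizing g t with
  | nil => simp [cntL, pairs]
  | cons x xs ih =>
    by_cases hg : x = '>'
    · simp only [List.foldl_cons, hg, cntL_cons, pairs, reduceIte, Char.reduceEq, ih]
      ring
    · by_cases hl : x = '<'
      · simp only [List.foldl_cons, hl, cntL_cons, pairs, reduceIte, Char.reduceEq, ih]
        ring
      · simp only [List.foldl_cons, if_neg hg, if_neg hl, cntL_cons, pairs, ih]
        ring

-- ===== VERDICT (by name: the statement is the Claim_ definition above) =====
theorem solution_spec : Claim_equal_solution := by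
  intro s _
  unfold Spec_solution solution solution_alt
  simp only [PySem.Str.len_eq]
  rw [PySem.List.foldl_pyRange_zero_pyGetD' s.toList ' '
        (fun (p : Int × Int) x =>
          if x = '>' then (p.1, p.2 + p.1)
          else if x = '<' then (p.1 - 1, p.2) else p),
      PySem.List.foldl_pyRange_zero_pyGetD' s.toList ' '
        (fun (c : Int) ch => if ch = '<' then c + 1 else c)]
  rw [countA, foldB]
  rw [show ((0:Int) + cntL s.toList) = cntL s.toList + 0 from by ring, foldA]
  ring
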